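-- pv_equiv track=rewrite | github.com/hnu-java/COMP3411-Assignment1 | cspOptimizer.py | SameDay
-- ===== SOURCE A (Python) =====
-- def SameDay(ass1, ass2):
--     # Iterates to the day of ass1 and checks if ass2 is within range
--     i = 0
--     while i < 41:
--         if ass1 > i and ass1 < i + 9:
--             if ass2 > i and ass2 < i + 9:
--                 return True
--         i += 8
--     return False
-- ===== SOURCE B (Python) =====
-- def SameDay(ass1, ass2):
--     # Closed form: integer hours 1..48 fall in exactly one 8-hour day-block,
--     # namely block number (x - 1) // 8; outside that range no block contains x.
--     if 0 < ass1 < 49 and 0 < ass2 < 49: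
--         return (ass1 - 1) // 8 == (ass2 - 1) // 8
--     return False
-- ===== Notes on version B (the rewrite author's own statement) =====
-- stated objective: simpler
-- what changed: Replaces the bucket-scanning while-loop with a closed-form range check plus equality of the block indices (x-1)//8, exact on the integer input domain.
import Mathlib
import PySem

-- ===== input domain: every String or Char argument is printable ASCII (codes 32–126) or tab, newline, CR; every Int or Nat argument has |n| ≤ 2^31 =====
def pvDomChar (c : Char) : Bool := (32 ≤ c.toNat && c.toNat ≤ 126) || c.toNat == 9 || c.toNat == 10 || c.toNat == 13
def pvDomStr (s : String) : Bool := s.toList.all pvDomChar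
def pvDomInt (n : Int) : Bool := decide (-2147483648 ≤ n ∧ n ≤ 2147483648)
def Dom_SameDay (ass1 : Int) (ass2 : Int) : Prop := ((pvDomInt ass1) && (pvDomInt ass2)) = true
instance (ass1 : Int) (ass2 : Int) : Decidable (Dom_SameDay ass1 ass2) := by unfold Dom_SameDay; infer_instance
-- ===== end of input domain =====

-- B replaces A's bucket-scanning while-loop with a closed-form range check plus
-- equality of block indices (x-1)//8, exact on the integer domain (objective: simpler).


-- ===== PORT A =====
-- the while loop: i starts at 0, steps by 8 while i < 41; early return True
def SameDayGo (ass1 : Int) (ass2 : Int) (i : Int) : Bool :=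
  if _h : i < 41 then
    if ass1 > i ∧ ass1 < i + 9 then
      if ass2 > i ∧ ass2 < i + 9 then true
      else SameDayGo ass1 ass2 (i + 8)
    else SameDayGo ass1 ass2 (i + 8)
  else false
termination_by (41 - i).toNat
decreasing_by all_goals (omega)

def SameDay (ass1 : Int) (ass2 : Int) : Bool := SameDayGo ass1 ass2 0

-- ===== PORT B =====
def SameDay_alt (ass1 : Int) (ass2 : Int) : Bool :=
  if 0 < ass1 ∧ ass1 < 49 ∧ 0 < ass2 ∧ ass2 < 49 then
    decide (PySem.Int.floordiv (ass1 - 1) 8 = PySem.Int.floordiv (ass2 - 1) 8)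
  else false

-- ===== PRECONDITION & SPEC =====
def Spec_SameDay (ass1 : Int) (ass2 : Int) (out : Bool) : Prop := out = SameDay_alt ass1 ass2
instance (ass1 : Int) (ass2 : Int) (out : Bool) : Decidable (Spec_SameDay ass1 ass2 out) := by unfold Spec_SameDay; infer_instance

-- ===== CLAIM =====
def Claim_equal_SameDay : Prop := ∀ (ass1 : Int) (ass2 : Int), Dom_SameDay ass1 ass2 → Spec_SameDay ass1 ass2 (SameDay ass1 ass2)

-- ===== LEMMAS AND PROOFS =====

-- 'a lies strictly inside the 9-hour window starting at block boundary i'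
def inBlock (a i : Int) : Prop := i < a ∧ a < i + 9

lemma go_step (a b i : Int) (h : i < 41) :
    SameDayGo a b i = true ↔ ((inBlock a i ∧ inBlock b i) ∨ SameDayGo a b (i + 8) = true) := by
  rw [SameDayGo]
  split_ifs with h1 h2 <;> simp_all [inBlock]

lemma go_stop (a b : Int) : SameDayGo a b 48 = false := by
  rw [SameDayGo]; norm_num

lemma A_char (a b : Int) :
    SameDay a b = true ↔ ∃ i ∈ ([0, 8, 16, 24, 32, 40] : List Int), inBlock a i ∧ inBlock b i := by
  have h40 : SameDayGo a b 40 = true ↔ (inBlock a 40 ∧ inBlock b 40) := by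
    rw [go_step a b 40 (by norm_num)]; norm_num [go_stop]
  have h32 : SameDayGo a b 32 = true ↔ ((inBlock a 32 ∧ inBlock b 32) ∨ (inBlock a 40 ∧ inBlock b 40)) := by
    rw [go_step a b 32 (by norm_num)]; norm_num [h40]
  have h24 : SameDayGo a b 24 = true ↔ ((inBlock a 24 ∧ inBlock b 24) ∨ (inBlock a 32 ∧ inBlock b 32) ∨ (inBlock a 40 ∧ inBlock b 40)) := by
    rw [go_step a b 24 (by norm_num)]; norm_num [h32]
  have h16 : SameDayGo a b 16 = true ↔ ((inBlock a 16 ∧ inBlock b 16) ∨ (inBlock a 24 ∧ inBlock b 24) ∨ (inBlock a 32 ∧ inBlock b 32) ∨ (inBlock a 40 ∧ inBlock b 40)) := by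
    rw [go_step a b 16 (by norm_num)]; norm_num [h24]
  have h8 : SameDayGo a b 8 = true ↔ ((inBlock a 8 ∧ inBlock b 8) ∨ (inBlock a 16 ∧ inBlock b 16) ∨ (inBlock a 24 ∧ inBlock b 24) ∨ (inBlock a 32 ∧ inBlock b 32) ∨ (inBlock a 40 ∧ inBlock b 40)) := by
    rw [go_step a b 8 (by norm_num)]; norm_num [h16]
  unfold SameDay
  rw [go_step a b 0 (by norm_num)]
  norm_num [h8]

lemma B_char (a b : Int) :
    SameDay_alt a b = true ↔
      (0 < a ∧ a < 49 ∧ 0 < b ∧ b < 49 ∧ (a - 1) / 8 = (b - 1) / 8) := by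
  unfold SameDay_alt
  split_ifs with h
  · obtain ⟨h1, h2, h3, h4⟩ := h
    rw [PySem.Int.floordiv_eq_ediv_of_pos (a := a - 1) (b := 8) (by norm_num),
        PySem.Int.floordiv_eq_ediv_of_pos (a := b - 1) (b := 8) (by norm_num)]
    simp [h1, h2, h3, h4]
  · simp only [false_iff]
    tauto

-- ===== VERDICT =====
theorem SameDay_spec : Claim_equal_SameDay := by
  intro a b _
  unfold Spec_SameDay
  rw [Bool.eq_iff_iff, A_char, B_char]
  simp only [List.mem_cons, inBlock]
  constructor
  · rintro ⟨i, hi, ⟨ha1, ha2⟩, ⟨hb1, hb2⟩⟩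
    rcases hi with rfl | rfl | rfl | rfl | rfl | rfl | h <;> first | omega | exact absurd h (by simp)
  · rintro ⟨h1, h2, h3, h4, h5⟩
    refine ⟨8 * ((a - 1) / 8), ?_, ?_, ?_⟩ <;> omega
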